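-- pv_equiv track=rewrite | github.com/pypi-data/pypi-mirror-403 | packages/arcjet/arcjet-0.2.3-py3-none-any.whl/arcjet/context.py | _parse_x_forwarded_for_values
-- ===== SOURCE A (Python) =====
-- from typing import Any, Iterable, Mapping, Protocol, Sequence, cast
--
-- def _parse_x_forwarded_for_values(values: Sequence[str]) -> list[str]:
--     """Parse one or more XFF header values into a single ordered list.
--
--     MDN: multiple X-Forwarded-For headers must be treated as a single list,
--     starting with the first IP of the first header and continuing to the last IP
--     of the last header.
--     """
--     out: list[str] = []
--     for v in values:
--         if not isinstance(v, str):
--             continue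
--         for item in v.split(","):
--             item = item.strip()
--             if item:
--                 out.append(item)
--     return out
-- ===== SOURCE B (Python) =====
-- def _parse_x_forwarded_for_values(values):
--     """Parse one or more XFF header values into a single ordered list.
--
--     Single-pass character state machine: walk every character once, building
--     the current token directly (leading whitespace is never stored, a run of
--     whitespace is held in `pending` and only committed when a further
--     non-space character arrives, so trailing whitespace is dropped for free);
--     a comma or the end of a value emits the token if it is non-empty.
--     No split/strip/join calls at all.
--     """
--     out = []
--     for v in values:
--         if not isinstance(v, str):
--             continue
--         token = ""
--         pending = ""
--         for ch in v:
--             if ch == ",":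
--                 if token:
--                     out.append(token)
--                 token = ""
--                 pending = ""
--             elif ch.isspace():
--                 if token:
--                     pending += ch
--             else:
--                 token += pending + ch
--                 pending = ""
--         if token:
--             out.append(token)
--     return out
-- ===== Notes on version B (the rewrite author's own statement) =====
-- stated objective: alternative
-- what changed: Replaces A's split-then-strip-then-filter passes with a single-pass character state machine that builds each token directly (whitespace buffered in a pending run and only committed before a later non-space character), emitting on ',' or end of value; no split/strip calls remain.
import Mathlib
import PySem

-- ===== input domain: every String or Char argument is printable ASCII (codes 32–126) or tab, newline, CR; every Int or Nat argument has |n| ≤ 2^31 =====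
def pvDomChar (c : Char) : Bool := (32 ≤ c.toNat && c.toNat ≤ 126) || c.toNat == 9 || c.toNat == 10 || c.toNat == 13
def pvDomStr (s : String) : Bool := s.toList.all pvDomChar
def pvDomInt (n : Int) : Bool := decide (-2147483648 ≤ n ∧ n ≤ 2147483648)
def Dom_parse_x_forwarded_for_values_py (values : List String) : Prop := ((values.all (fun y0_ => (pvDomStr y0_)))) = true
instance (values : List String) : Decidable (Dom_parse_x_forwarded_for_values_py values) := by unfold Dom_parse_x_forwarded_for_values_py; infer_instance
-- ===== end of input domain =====

-- B replaces A's split/strip/filter passes by a single-pass character state machine (objective: alternative algorithm, same cost).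

-- ===== PORT A =====
-- nested loops: for each value, split on ",", strip each piece, append the non-empty ones.
-- 'v.split(",")' = PySem.Str.split? v "," which is 'some' since "," ≠ ""; '.getD []' only discharges that impossible case.
def parse_x_forwarded_for_values_py (values : List String) : List String :=
  values.foldl (fun out v =>
    ((PySem.Str.split? v ",").getD []).foldl (fun out item =>
      let item := PySem.Str.strip item
      if item ≠ "" then out ++ [item] else out) out) []

-- ===== PORT B =====
-- Source B's inner loop body: state is (out, token, pending); Python's per-character string
-- concatenations are rendered on the token's character list (a Python str is a char sequence),
-- 'ch.isspace()' is PySem.Chars.isspace ch.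
def pvStepB (st : List String × List Char × List Char) (ch : Char) :
    List String × List Char × List Char :=
  if ch = ',' then
    ((if st.2.1 ≠ [] then st.1 ++ [String.ofList st.2.1] else st.1), [], [])
  else if PySem.Chars.isspace ch then
    (st.1, st.2.1, if st.2.1 ≠ [] then st.2.2 ++ [ch] else st.2.2)
  else
    (st.1, st.2.1 ++ st.2.2 ++ [ch], [])

-- Source B: for each string value, run the state machine over its characters, then flush the last token.
def parse_x_forwarded_for_values_py_alt (values : List String) : List String :=
  values.foldl (fun out v =>
    let st := v.toList.foldl pvStepB (out, [], [])
    if st.2.1 ≠ [] then st.1 ++ [String.ofList st.2.1] else st.1) []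

-- ===== PRECONDITION & SPEC =====
def Spec_parse_x_forwarded_for_values_py (values : List String) (out : List String) : Prop := out = parse_x_forwarded_for_values_py_alt values
instance (values : List String) (out : List String) : Decidable (Spec_parse_x_forwarded_for_values_py values out) := by unfold Spec_parse_x_forwarded_for_values_py; infer_instance

-- ===== CLAIM (what is proved, stated in full; the proofs are below) =====
def Claim_equal_parse_x_forwarded_for_values_py : Prop := ∀ (values : List String), Dom_parse_x_forwarded_for_values_py values → Spec_parse_x_forwarded_for_values_py values (parse_x_forwarded_for_values_py values)

-- ===== LEMMAS AND PROOFS =====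

-- a plain structural split-on-one-character, the reference form of Chars.splitOn s [c]
def pvSplit (c : Char) : List Char → List (List Char)
  | [] => [[]]
  | x :: xs => if x = c then [] :: pvSplit c xs else (pvSplit c xs).modifyHead (x :: ·)

theorem pvSplit_ne_nil (c : Char) (l : List Char) : pvSplit c l ≠ [] := by
  induction l with
  | nil => simp [pvSplit]
  | cons x xs ih =>
    simp only [pvSplit]
    split
    · simp
    · cases h : pvSplit c xs with
      | nil => exact absurd h ih
      | cons a t => simp [List.modifyHead]

theorem pvSplit_go_eq (c : Char) : ∀ (fuel : Nat) (l cur : List Char) (acc : List (List Char)),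
    l.length < fuel →
    PySem.Chars.splitOn.go [c] fuel l cur acc
      = acc.reverse ++ (pvSplit c l).modifyHead (cur.reverse ++ ·) := by
  intro fuel
  induction fuel with
  | zero => intro l cur acc h; omega
  | succ n ih =>
    intro l cur acc h
    cases l with
    | nil =>
      simp [PySem.Chars.splitOn.go, pvSplit, List.modifyHead]
    | cons x rest =>
      have hlen : rest.length < n := by simpa using Nat.lt_of_succ_lt_succ h
      by_cases hx : x = c
      · subst hx
        have hp : List.isPrefixOf [x] (x :: rest) = true := by
          simp [List.isPrefixOf]
        simp only [PySem.Chars.splitOn.go, hp, if_pos, List.length_cons, List.drop_succ_cons,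
          List.drop_zero, List.length_nil]
        rw [ih rest [] (cur.reverse :: acc) hlen]
        cases hps : pvSplit x rest with
        | nil => exact absurd hps (pvSplit_ne_nil x rest)
        | cons a t => simp [pvSplit, List.modifyHead, hps]
      · have hcx : (c == x) = false := beq_eq_false_iff_ne.mpr (Ne.symm hx)
        have hp : List.isPrefixOf [c] (x :: rest) = false := by
          simp [List.isPrefixOf, hcx]
        simp only [PySem.Chars.splitOn.go, hp, Bool.false_eq_true, if_false]
        rw [ih rest (x :: cur) acc hlen]
        have hm : (pvSplit c rest).modifyHead ((x :: cur).reverse ++ ·)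
            = (pvSplit c (x :: rest)).modifyHead (cur.reverse ++ ·) := by
          simp only [pvSplit, if_neg hx]
          cases hps : pvSplit c rest with
          | nil => exact absurd hps (pvSplit_ne_nil c rest)
          | cons a t => simp [List.modifyHead]
        rw [hm]

theorem splitOn_eq_pvSplit (c : Char) (s : List Char) :
    PySem.Chars.splitOn s [c] = pvSplit c s := by
  unfold PySem.Chars.splitOn
  rw [pvSplit_go_eq c (s.length + 1) s [] [] (by omega)]
  cases h : pvSplit c s with
  | nil => exact absurd h (pvSplit_ne_nil c s)
  | cons a t => simp [List.modifyHead]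

-- A's inner loop: strip the pieces, keep the non-empty ones, append them to the accumulator
theorem foldl_tokens (ps : List String) (out : List String) :
    ps.foldl (fun out item =>
      let item := PySem.Str.strip item
      if item ≠ "" then out ++ [item] else out) out
    = out ++ ((ps.map PySem.Str.strip).filter (fun t => t ≠ "")) := by
  induction ps generalizing out with
  | nil => simp
  | cons p ps ih =>
    simp only [List.foldl_cons, List.map_cons, List.filter_cons]
    by_cases h : PySem.Str.strip p ≠ ""
    · rw [if_pos h, ih, if_pos (decide_eq_true h)]
      simp
    · rw [if_neg h, ih, if_neg (by simpa using h)]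

-- A as a flatMap of per-value token lists (string level)
theorem portA_eq_flatMap (values : List String) :
    parse_x_forwarded_for_values_py values
      = values.flatMap (fun v =>
          (((PySem.Str.split? v ",").getD []).map PySem.Str.strip).filter (fun t => t ≠ "")) := by
  unfold parse_x_forwarded_for_values_py
  rw [PySem.List.foldl_congr_mem values _
    (fun out v => out ++ ((((PySem.Str.split? v ",").getD []).map PySem.Str.strip).filter (fun t => t ≠ ""))) []
    (fun out v _ => foldl_tokens _ out)]
  rw [PySem.List.foldl_append_eq_flatMap]
  simp

-- the string pieces of v.split(","), seen at the char level
theorem split_comma_toList (s : String) :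
    (((PySem.Str.split? s ",").getD []).map String.toList) = pvSplit ',' s.toList := by
  have h := PySem.Str.split?_map s ","
  have hc : PySem.Chars.split? s.toList (",".toList) = some (PySem.Chars.splitOn s.toList [',']) := by
    simp [PySem.Chars.split?]
  rw [hc] at h
  cases hs : PySem.Str.split? s "," with
  | none => rw [hs] at h; simp at h
  | some ps =>
    rw [hs] at h
    simp only [Option.map_some, Option.some.injEq] at h
    simpa [splitOn_eq_pvSplit] using h

-- stripping and filtering commutes with .toList
theorem tokens_toList (ps : List String) :
    (((ps.map PySem.Str.strip).filter (fun t => t ≠ "")).map String.toList)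
    = ((ps.map String.toList).map PySem.Chars.strip).filter (fun l => l ≠ []) := by
  induction ps with
  | nil => simp
  | cons p ps ih =>
    have hiff : (PySem.Str.strip p ≠ "") ↔ (PySem.Chars.strip p.toList ≠ []) := by
      rw [← PySem.Str.toList_strip]
      exact not_congr (by rw [show ([] : List Char) = "".toList from rfl, String.toList_inj])
    simp only [List.map_cons, List.filter_cons]
    by_cases h : PySem.Str.strip p ≠ ""
    · have hb : decide (PySem.Str.strip p ≠ "") = true := decide_eq_true h
      have hb' : decide (PySem.Chars.strip p.toList ≠ []) = true := decide_eq_true (hiff.mp h)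
      simp only [hb, hb']
      simpa [Function.comp] using ih
    · have hb : decide (PySem.Str.strip p ≠ "") = false := decide_eq_false h
      have hb' : decide (PySem.Chars.strip p.toList ≠ []) = false :=
        decide_eq_false ((not_iff_not.mpr hiff).mp h)
      simp only [hb, hb', Bool.false_eq_true, if_false]
      simpa [Function.comp] using ih

-- the per-value token list at the char level
theorem tokens_of_string (v : String) :
    ((((PySem.Str.split? v ",").getD []).map PySem.Str.strip).filter (fun t => t ≠ "")).map String.toList
    = (((pvSplit ',' v.toList).map PySem.Chars.strip).filter (fun l => l ≠ [])) := by
  rw [tokens_toList, split_comma_toList]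

-- ===== the state machine, char level =====

-- tokens emitted by Source B's automaton from state (token = t, pending = p) over the remaining chars
def pvAuto : List Char → List Char → List Char → List (List Char)
  | [], t, _ => if t ≠ [] then [t] else []
  | c :: cs, t, p =>
    if c = ',' then (if t ≠ [] then [t] else []) ++ pvAuto cs [] []
    else if PySem.Chars.isspace c then pvAuto cs t (if t ≠ [] then p ++ [c] else p)
    else pvAuto cs (t ++ p ++ [c]) []

-- the reachable-state invariant: pending is pure whitespace (and empty while the token is),
-- the token never starts or ends with whitespace
def pvInv (t p : List Char) : Prop :=
  (t = [] → p = []) ∧ (∀ c ∈ p, PySem.Chars.isspace c = true) ∧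
  (∀ a, t.head? = some a → PySem.Chars.isspace a = false) ∧
  (∀ a, t.getLast? = some a → PySem.Chars.isspace a = false)

theorem strip_cons_space (c : Char) (l : List Char) (hc : PySem.Chars.isspace c = true) :
    PySem.Chars.strip (c :: l) = PySem.Chars.strip l := by
  simp [PySem.Chars.strip, PySem.Chars.lstrip, hc]

theorem strip_state (t p : List Char) (hinv : pvInv t p) (ht : t ≠ []) :
    PySem.Chars.strip (t ++ p) = t := by
  obtain ⟨-, hp, hh, hl⟩ := hinv
  cases t with
  | nil => exact absurd rfl ht
  | cons a t' =>
    have ha : PySem.Chars.isspace a = false := hh a rfl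
    have hrev : List.dropWhile PySem.Chars.isspace (p.reverse ++ (a :: t').reverse)
        = (a :: t').reverse := by
      rw [List.dropWhile_append]
      have hdp : List.dropWhile PySem.Chars.isspace p.reverse = [] := by
        apply List.dropWhile_eq_nil_iff.mpr
        intro x hx
        exact hp x (by simpa using hx)
      rw [hdp]
      simp only [List.isEmpty_nil, if_pos]
      cases hrl : (a :: t').reverse with
      | nil => simp at hrl
      | cons b r =>
        have hb : (a :: t').getLast? = some b := by
          rw [List.getLast?_eq_head?_reverse, hrl]; rfl
        rw [List.dropWhile_cons, hl b hb]
        simp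
    simp only [PySem.Chars.strip, PySem.Chars.lstrip, PySem.Chars.rstrip]
    rw [List.cons_append, List.dropWhile_cons, ha]
    simp only [Bool.false_eq_true, if_false]
    rw [show (a :: (t' ++ p)).reverse = p.reverse ++ (a :: t').reverse by simp]
    rw [hrev, List.reverse_reverse]

-- emitting: the head piece's stripped value, filtered, is exactly what the automaton flushes
theorem pvEmit (t p : List Char) (hinv : pvInv t p) (M : List (List Char)) :
    (PySem.Chars.strip (t ++ p) :: M).filter (fun x => x ≠ [])
      = (if t ≠ [] then [t] else []) ++ M.filter (fun x => x ≠ []) := by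
  by_cases ht : t = []
  · subst ht
    rw [hinv.1 rfl]
    simp [PySem.Chars.strip, PySem.Chars.lstrip, PySem.Chars.rstrip]
  · rw [strip_state t p hinv ht, List.filter_cons, if_pos (by simpa using ht), if_pos ht]
    rfl

-- the automaton from any reachable state computes A's strip-and-filter of the remaining pieces
theorem pvAuto_spec (l : List Char) : ∀ (t p h : List Char) (rest : List (List Char)),
    pvSplit ',' l = h :: rest → pvInv t p →
    pvAuto l t p = (((t ++ p ++ h) :: rest).map PySem.Chars.strip).filter (fun x => x ≠ []) := by
  induction l with
  | nil =>
    intro t p h rest hs hinv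
    simp only [pvSplit] at hs
    obtain ⟨rfl, rfl⟩ : h = [] ∧ rest = [] := by
      constructor <;> [exact (List.cons.injEq _ _ _ _ ▸ hs).1.symm;
        exact (List.cons.injEq _ _ _ _ ▸ hs).2.symm]
    simp only [pvAuto, List.append_nil, List.map_cons, List.map_nil]
    rw [pvEmit t p hinv []]
    simp
  | cons c cs ih =>
    intro t p h rest hs hinv
    by_cases hc : c = ','
    · subst hc
      simp only [pvSplit, if_true] at hs
      obtain ⟨rfl, hrest⟩ : h = [] ∧ pvSplit ',' cs = rest := by
        constructor <;> [exact (List.cons.injEq _ _ _ _ ▸ hs).1.symm;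
          exact (List.cons.injEq _ _ _ _ ▸ hs).2]
      simp only [pvAuto, if_true]
      cases hcs : pvSplit ',' cs with
      | nil => exact absurd hcs (pvSplit_ne_nil ',' cs)
      | cons h' rest' =>
        rw [ih [] [] h' rest' hcs (by refine ⟨fun _ => rfl, by simp, by simp, by simp⟩)]
        rw [hcs] at hrest; subst hrest
        simp only [List.append_nil, List.map_cons, List.nil_append]
        rw [pvEmit t p hinv]
    · simp only [pvSplit, if_neg hc] at hs
      cases hcs : pvSplit ',' cs with
      | nil => exact absurd hcs (pvSplit_ne_nil ',' cs)
      | cons h' rest' =>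
        rw [hcs] at hs
        simp only [List.modifyHead] at hs
        obtain ⟨hh, hrest⟩ : h = c :: h' ∧ rest = rest' := by
          constructor <;> [exact (List.cons.injEq _ _ _ _ ▸ hs).1.symm;
            exact (List.cons.injEq _ _ _ _ ▸ hs).2.symm]
        subst hh
        rw [hrest]
        simp only [pvAuto, if_neg hc]
        by_cases hws : PySem.Chars.isspace c = true
        · rw [if_pos hws]
          by_cases ht : t = []
          · subst ht
            have hp0 : p = [] := hinv.1 rfl
            subst hp0
            simp only [ne_eq, not_true_eq_false, if_false]
            rw [ih [] [] h' rest' hcs ⟨fun _ => rfl, by simp, by simp, by simp⟩]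
            simp only [List.nil_append, List.map_cons]
            rw [strip_cons_space c h' hws]
          · rw [if_pos ht]
            have hinv' : pvInv t (p ++ [c]) := by
              obtain ⟨h1, h2, h3, h4⟩ := hinv
              refine ⟨fun h0 => absurd h0 ht, ?_, h3, h4⟩
              intro x hx
              rcases List.mem_append.mp hx with hx | hx
              · exact h2 x hx
              · simp at hx; subst hx; exact hws
            rw [ih t (p ++ [c]) h' rest' hcs hinv']
            simp
        · rw [if_neg hws]
          have hinv' : pvInv (t ++ p ++ [c]) [] := by
            obtain ⟨h1, h2, h3, h4⟩ := hinv
            refine ⟨by simp, by simp, ?_, ?_⟩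
            · intro a ha
              cases t with
              | nil =>
                rw [h1 rfl] at ha
                simp at ha
                subst ha
                exact Bool.not_eq_true _ ▸ (by simpa using hws)
              | cons b t' =>
                simp at ha
                subst ha
                exact h3 b rfl
            · intro a ha
              rw [show t ++ p ++ [c] = (t ++ p) ++ [c] from rfl, List.getLast?_concat] at ha
              obtain rfl : a = c := by injection ha with h0; exact h0.symm
              exact Bool.not_eq_true _ ▸ (by simpa using hws)
          rw [ih (t ++ p ++ [c]) [] h' rest' hcs hinv']
          simp

-- from the initial state the automaton is exactly A's per-value token list (char level)
theorem auto_eq_tokens (l : List Char) :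
    pvAuto l [] [] = ((pvSplit ',' l).map PySem.Chars.strip).filter (fun x => x ≠ []) := by
  cases hcs : pvSplit ',' l with
  | nil => exact absurd hcs (pvSplit_ne_nil ',' l)
  | cons h rest =>
    rw [pvAuto_spec l [] [] h rest hcs ⟨fun _ => rfl, by simp, by simp, by simp⟩]
    simp

-- the port's foldl over one value, flushed, appends the automaton's tokens
theorem foldl_stepB (l : List Char) : ∀ (out : List String) (t p : List Char),
    (if (l.foldl pvStepB (out, t, p)).2.1 ≠ [] then
        (l.foldl pvStepB (out, t, p)).1 ++ [String.ofList (l.foldl pvStepB (out, t, p)).2.1]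
      else (l.foldl pvStepB (out, t, p)).1)
    = out ++ (pvAuto l t p).map String.ofList := by
  induction l with
  | nil =>
    intro out t p
    simp only [List.foldl_nil, pvAuto]
    by_cases ht : t = []
    · subst ht; simp
    · rw [if_pos (by simpa using ht), if_pos ht]; simp
  | cons c cs ih =>
    intro out t p
    simp only [List.foldl_cons, pvAuto, pvStepB]
    by_cases hc : c = ','
    · rw [if_pos hc, if_pos hc, ih]
      by_cases ht : t = []
      · subst ht; simp
      · rw [if_pos (by simpa using ht), if_pos ht]; simp
    · rw [if_neg hc, if_neg hc]
      by_cases hws : PySem.Chars.isspace c = true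
      · rw [if_pos hws, if_pos hws, ih]
      · rw [if_neg hws, if_neg hws, ih]

-- B as a flatMap of per-value automaton runs
theorem portB_eq_flatMap (values : List String) :
    parse_x_forwarded_for_values_py_alt values
      = values.flatMap (fun v => (pvAuto v.toList [] []).map String.ofList) := by
  unfold parse_x_forwarded_for_values_py_alt
  rw [PySem.List.foldl_congr_mem values _
    (fun out v => out ++ (pvAuto v.toList [] []).map String.ofList) []
    (fun out v _ => foldl_stepB v.toList out [] [])]
  rw [PySem.List.foldl_append_eq_flatMap]
  simp

-- per value, A's token list IS the automaton's
theorem tokens_eq_auto (v : String) :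
    (((PySem.Str.split? v ",").getD []).map PySem.Str.strip).filter (fun t => t ≠ "")
      = (pvAuto v.toList [] []).map String.ofList := by
  rw [auto_eq_tokens, ← tokens_of_string, List.map_map]
  have : String.ofList ∘ String.toList = id := by
    funext s; simp
  rw [this, List.map_id]

-- ===== VERDICT (by name: the statement is the Claim_ definition above) =====
theorem parse_x_forwarded_for_values_py_spec : Claim_equal_parse_x_forwarded_for_values_py := by
  intro values _
  unfold Spec_parse_x_forwarded_for_values_py
  rw [portA_eq_flatMap, portB_eq_flatMap]
  exact List.flatMap_congr (fun v _ => tokens_eq_auto v)
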